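-- pv_equiv track=rewrite | github.com/b34601512/inventory_aligner | logic.py | _validate_material_code
-- ===== SOURCE A (Python) =====
-- def _validate_material_code(code: str) -> bool:
--     """验证物料编码格式"""
--     if not code or not isinstance(code, str):
--         return False
--
--     parts = code.split('.')
--     if len(parts) != 6:
--         return False
--
--     for part in parts:
--         if not part.isdigit():
--             return False
--
--     return True
-- ===== SOURCE B (Python) =====
-- def _validate_material_code(code: str) -> bool:
--     if not code or not isinstance(code, str):
--         return False
--     seps = 0
--     nonempty = False
--     allnum = True
--     for ch in code:
--         if ch == '.':
--             if not (nonempty and allnum):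
--                 return False
--             seps += 1
--             nonempty = False
--             allnum = True
--         else:
--             nonempty = True
--             if not ch.isdigit():
--                 allnum = False
--     return seps == 5 and nonempty and allnum
-- ===== Notes on version B (the rewrite author's own statement) =====
-- stated objective: alternative
-- what changed: Replaces the split-into-parts-then-per-part digit check with a single left-to-right character scan maintaining a separator count and per-segment nonempty/all-digit flags, allocating no intermediate list.
import Mathlib
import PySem

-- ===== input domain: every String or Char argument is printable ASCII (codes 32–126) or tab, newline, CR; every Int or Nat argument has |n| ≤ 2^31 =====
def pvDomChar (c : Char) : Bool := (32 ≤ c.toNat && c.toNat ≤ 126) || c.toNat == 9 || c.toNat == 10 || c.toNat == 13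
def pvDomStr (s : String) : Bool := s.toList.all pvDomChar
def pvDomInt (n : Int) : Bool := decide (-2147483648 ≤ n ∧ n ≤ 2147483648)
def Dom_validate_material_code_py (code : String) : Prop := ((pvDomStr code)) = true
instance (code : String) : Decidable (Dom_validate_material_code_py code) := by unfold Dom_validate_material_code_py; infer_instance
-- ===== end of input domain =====

-- B replaces split('.')-then-loop by a single character scan with separator count and segment flags (alternative decomposition, same cost).


-- ===== PORT A =====
-- 'for part in parts: if not part.isdigit(): return False; return True'
def validate_material_code_partsLoop : List (List Char) → Bool
  | [] => true
  | p :: rest =>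
    if ¬ PySem.Chars.strIsdigit p then false
    else validate_material_code_partsLoop rest

def validate_material_code_py (code : String) : Bool :=
  if code == "" then false
  else
    let parts := PySem.Chars.splitOn code.toList ['.']
    if parts.length ≠ 6 then false
    else validate_material_code_partsLoop parts

-- ===== PORT B =====
-- the character scan: state = (seps, nonempty, allnum)
def validate_material_code_scan : List Char → Nat → Bool → Bool → Bool
  | [], seps, ne, ok => seps == 5 && ne && ok
  | c :: rest, seps, ne, ok =>
    if c == '.' then
      if ne && ok then validate_material_code_scan rest (seps + 1) false true
      else false
    else validate_material_code_scan rest seps true (ok && PySem.Chars.isdigit c)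

def validate_material_code_py_alt (code : String) : Bool :=
  if code == "" then false
  else validate_material_code_scan code.toList 0 false true

-- ===== PRECONDITION & SPEC =====
def Spec_validate_material_code_py (code : String) (out : Bool) : Prop := out = validate_material_code_py_alt code
instance (code : String) (out : Bool) : Decidable (Spec_validate_material_code_py code out) := by unfold Spec_validate_material_code_py; infer_instance

-- ===== CLAIM (what is proved, stated in full; the proofs are below) =====
def Claim_equal_validate_material_code_py : Prop := ∀ (code : String), Dom_validate_material_code_py code → Spec_validate_material_code_py code (validate_material_code_py code)

-- ===== LEMMAS AND PROOFS =====

-- simple structural split on '.', used as the common reference point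
def pvSplitDot : List Char → List (List Char)
  | [] => [[]]
  | c :: rest =>
    if c = '.' then [] :: pvSplitDot rest
    else
      match pvSplitDot rest with
      | p :: ps => (c :: p) :: ps
      | [] => [[c]]

theorem pvSplitDot_ne_nil (l : List Char) : pvSplitDot l ≠ [] := by
  cases l with
  | nil => simp [pvSplitDot]
  | cons c rest =>
    simp only [pvSplitDot]
    split_ifs
    · simp
    · cases h : pvSplitDot rest <;> simp

theorem splitOn_go_eq (l : List Char) : ∀ (fuel : Nat) (cur : List Char) (acc : List (List Char)),
    l.length ≤ fuel →
    PySem.Chars.splitOn.go ['.'] fuel l cur acc =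
      acc.reverse ++ (match pvSplitDot l with
        | p :: ps => (cur.reverse ++ p) :: ps
        | [] => []) := by
  induction l with
  | nil =>
    intro fuel cur acc _
    cases fuel <;> simp [PySem.Chars.splitOn.go, pvSplitDot]
  | cons c rest ih =>
    intro fuel cur acc hf
    cases fuel with
    | zero => simp at hf
    | succ f =>
      simp only [PySem.Chars.splitOn.go]
      by_cases hc : c = '.'
      · subst hc
        have hpre : List.isPrefixOf ['.'] ('.' :: rest) = true := by
          simp [List.isPrefixOf]
        rw [if_pos hpre]
        have hdrop : List.drop (['.'] : List Char).length ('.' :: rest) = rest := rfl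
        rw [hdrop]
        rw [ih f [] ((cur.reverse) :: acc) (by simpa using Nat.le_of_succ_le_succ hf)]
        rcases h : pvSplitDot rest with _ | ⟨p, ps⟩
        · exact absurd h (pvSplitDot_ne_nil rest)
        · simp [pvSplitDot, h]
      · have hpre : List.isPrefixOf ['.'] (c :: rest) = false := by
          simp [List.isPrefixOf]
          intro h; exact hc h.symm
        rw [if_neg (by simp [hpre])]
        have := ih f (c :: cur) acc (by simpa using Nat.le_of_succ_le_succ hf)
        rw [this]
        rcases h : pvSplitDot rest with _ | ⟨p, ps⟩
        · exact absurd h (pvSplitDot_ne_nil rest)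
        · simp [pvSplitDot, hc, h]

theorem splitOn_eq_pvSplitDot (l : List Char) :
    PySem.Chars.splitOn l ['.'] =
      (match pvSplitDot l with
        | p :: ps => p :: ps
        | [] => []) := by
  have := splitOn_go_eq l (l.length + 1) [] [] (Nat.le_succ _)
  simpa [PySem.Chars.splitOn] using this

theorem partsLoop_eq_all (parts : List (List Char)) :
    validate_material_code_partsLoop parts = parts.all PySem.Chars.strIsdigit := by
  induction parts with
  | nil => simp [validate_material_code_partsLoop]
  | cons p ps ih =>
    simp only [validate_material_code_partsLoop, List.all_cons, ih]
    by_cases h : PySem.Chars.strIsdigit p <;> simp [h]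

set_option maxRecDepth 4000 in
theorem scan_eq (l : List Char) : ∀ (seps : Nat) (ne ok : Bool) (p : List Char) (ps : List (List Char)),
    pvSplitDot l = p :: ps →
    validate_material_code_scan l seps ne ok =
      ((seps + 1 + ps.length == 6) && ((ne || !p.isEmpty) && ok && p.all PySem.Chars.isdigit)
        && ps.all PySem.Chars.strIsdigit) := by
  induction l with
  | nil =>
    intro seps ne ok p ps h
    simp only [pvSplitDot] at h
    injection h with h1 h2
    subst h1; subst h2
    simp only [validate_material_code_scan, List.length_nil, List.all_nil, List.isEmpty_nil]
    have : (seps == 5) = (seps + 1 + 0 == 6) := by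
      by_cases h5 : seps = 5
      · subst h5; rfl
      · have h6 : ¬ (seps + 1 + 0 = 6) := by omega
        simp [h5, h6]
    rw [this]
    cases ne <;> cases ok <;> simp
  | cons c rest ih =>
    intro seps ne ok p ps h
    simp only [pvSplitDot] at h
    by_cases hc : c = '.'
    · rw [if_pos hc] at h
      rcases hq : pvSplitDot rest with _ | ⟨q, qs⟩
      · exact absurd hq (pvSplitDot_ne_nil rest)
      rw [hq] at h
      injection h with h1 h2
      subst h1; subst h2
      simp only [validate_material_code_scan, hc, beq_self_eq_true, if_true]
      by_cases hok : ne = true ∧ ok = true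
      · obtain ⟨hne, hok'⟩ := hok
        subst hne; subst hok'
        simp only [Bool.and_self, if_true]
        rw [ih (seps + 1) false true q qs hq]
        have harith : seps + 1 + 1 + qs.length = seps + 1 + (q :: qs).length := by
          simp [List.length_cons]; omega
        rw [show seps + 1 + 1 + qs.length = seps + 1 + (q :: qs).length from harith]
        simp [PySem.Chars.strIsdigit, List.isEmpty_iff, Bool.and_comm, Bool.and_assoc, Bool.and_left_comm]
      · have hcond : (ne && ok) = false := by
          cases ne <;> cases ok <;> simp_all
        rw [hcond]
        simp only [Bool.false_eq_true, if_false]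
        cases ne with
        | false => simp
        | true =>
          have hok' : ok = false := by cases ok <;> simp_all
          subst hok'
          simp
    · rw [if_neg hc] at h
      rcases hq : pvSplitDot rest with _ | ⟨q, qs⟩
      · exact absurd hq (pvSplitDot_ne_nil rest)
      rw [hq] at h
      injection h with h1 h2
      subst h1; subst h2
      simp only [validate_material_code_scan]
      rw [if_neg (by simp [hc])]
      rw [ih seps true (ok && PySem.Chars.isdigit c) q qs hq]
      cases ne <;> cases ok <;>
        simp [List.all_cons, Bool.and_comm, Bool.and_assoc, Bool.and_left_comm]

-- ===== VERDICT (by name: the statement is the Claim_ definition above) =====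
theorem validate_material_code_py_spec : Claim_equal_validate_material_code_py := by
  intro code _
  unfold Spec_validate_material_code_py validate_material_code_py validate_material_code_py_alt
  by_cases hempty : code == ""
  · simp [hempty]
  · rw [if_neg hempty, if_neg hempty]
    rcases h : pvSplitDot code.toList with _ | ⟨p, ps⟩
    · exact absurd h (pvSplitDot_ne_nil _)
    have hsplit : PySem.Chars.splitOn code.toList ['.'] = p :: ps := by
      rw [splitOn_eq_pvSplitDot, h]
    rw [scan_eq code.toList 0 false true p ps h]
    simp only [hsplit, partsLoop_eq_all, List.all_cons, List.length_cons]
    by_cases hlen : ps.length + 1 = 6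
    · rw [if_neg (by omega)]
      have : (0 + 1 + ps.length == 6) = true := by simp [Nat.beq_eq]; omega
      simp [this, PySem.Chars.strIsdigit, Bool.and_comm, Bool.and_assoc, Bool.and_left_comm]
    · rw [if_pos (by omega)]
      have : (0 + 1 + ps.length == 6) = false := by simp [Nat.beq_eq]; omega
      simp [this]
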